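-- pv_equiv track=rewrite | github.com/qbhan/cylinder_nerf- | ddp_model.py | remap_name
-- ===== SOURCE A (Python) =====
-- def remap_name(name):
--     name = name.replace('.', '-')  # dot is not allowed by pytorch
--     if name[-1] == '/':
--         name = name[:-1]
--     idx = name.rfind('/')
--     for i in range(2):
--         if idx >= 0:
--             idx = name[:idx].rfind('/')
--     return name[idx + 1:]
-- ===== SOURCE B (Python) =====
-- def remap_name(name):
--     name = name.replace('.', '-')
--     if name.endswith('/'):
--         name = name[:-1]
--     return '/'.join(name.split('/')[-3:])
-- ===== Notes on version B (the rewrite author's own statement) =====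
-- stated objective: simpler
-- what changed: Replaced the three reverse rfind scans with their slice bookkeeping by a single split on the slash separator, a [-3:] slice of the segment list, and a join.
import Mathlib
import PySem

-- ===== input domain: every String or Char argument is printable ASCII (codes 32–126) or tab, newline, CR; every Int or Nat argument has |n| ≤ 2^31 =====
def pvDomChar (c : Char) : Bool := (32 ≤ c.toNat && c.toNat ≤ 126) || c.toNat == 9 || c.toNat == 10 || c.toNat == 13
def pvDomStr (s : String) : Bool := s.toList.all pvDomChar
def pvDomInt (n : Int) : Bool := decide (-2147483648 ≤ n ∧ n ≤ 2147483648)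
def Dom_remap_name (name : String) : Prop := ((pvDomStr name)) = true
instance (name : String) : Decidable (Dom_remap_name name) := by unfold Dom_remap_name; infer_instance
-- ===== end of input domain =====

-- B replaces A's three reverse rfind scans and their slice bookkeeping by a single split on the
-- slash separator, a [-3:] slice of the segment list, and a join (objective: simpler); A raises
-- IndexError on the empty string (excluded by Pre_).

-- ===== PORT A =====
def remap_name (name : String) : String :=
  let n1 := PySem.Str.replace name "." "-"
  let n2 := if PySem.Str.pyGet? n1 (-1) = some '/' then PySem.Str.slice n1 none (some (-1)) else n1
  let idx0 := PySem.Str.rfind n2 "/"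
  let idx := (PySem.List.pyRange 0 2 1).foldl
      (fun idx _i => if 0 ≤ idx then PySem.Str.rfind (PySem.Str.slice n2 none (some idx)) "/" else idx) idx0
  PySem.Str.slice n2 (some (idx + 1)) none

-- ===== PORT B =====
def remap_name_alt (name : String) : String :=
  let n1 := PySem.Str.replace name "." "-"
  let n2 := if PySem.Str.endswith n1 "/" then PySem.Str.slice n1 none (some (-1)) else n1
  match PySem.Str.split? n2 "/" with
  | some parts => PySem.Str.join "/" (PySem.List.slice parts (some (-3)) none)
  | none => ""

-- ===== PRECONDITION & SPEC =====
-- Pre_ excludes only the empty string, on which Python A raises IndexError at name[-1].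
def Pre_remap_name (name : String) : Prop := name ≠ ""
instance (name : String) : Decidable (Pre_remap_name name) := by unfold Pre_remap_name; infer_instance
def pvWitness_remap_name : String := "logs/run-1/model/"

def Spec_remap_name (name : String) (out : String) : Prop := out = remap_name_alt name
instance (name : String) (out : String) : Decidable (Spec_remap_name name out) := by unfold Spec_remap_name; infer_instance

-- ===== CLAIM (what is proved, stated in full; the proofs are below) =====
def Claim_equal_remap_name : Prop := ∀ (name : String), Dom_remap_name name → Pre_remap_name name → Spec_remap_name name (remap_name name)

-- ===== LEMMAS AND PROOFS =====

/-- Structural single-char split on '/': first piece and remaining pieces. -/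
def pvSp : List Char → List Char × List (List Char)
  | [] => ([], [])
  | x :: r => if x = '/' then ([], (pvSp r).1 :: (pvSp r).2) else (x :: (pvSp r).1, (pvSp r).2)

def pvParts (s : List Char) : List (List Char) := (pvSp s).1 :: (pvSp s).2

/-- One iteration of A's loop body, on char lists. -/
def pvStep (s : List Char) (idx : Int) : Int :=
  if 0 ≤ idx then PySem.Chars.rfind (s.take idx.toNat) ['/'] else idx

/-- rfind followed by k iterations of A's loop body. -/
def pvSteps : Nat → List Char → Int
  | 0, s => PySem.Chars.rfind s ['/']
  | k+1, s => pvStep s (pvSteps k s)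

theorem pvGo_zero (s sub : List Char) :
    PySem.Chars.rfind.go s sub 0 = if sub.isPrefixOf s then 0 else -1 := by
  simp [PySem.Chars.rfind.go]

theorem pvGo_succ (s sub : List Char) (j : Nat) :
    PySem.Chars.rfind.go s sub (j+1)
      = if sub.isPrefixOf (s.drop (j+1)) then ((j:Int)+1) else PySem.Chars.rfind.go s sub j := by
  simp [PySem.Chars.rfind.go]

theorem pvPrefix_single (c : Char) (t : List Char) : [c].isPrefixOf t = true ↔ t.head? = some c := by
  cases t with
  | nil => simp [List.isPrefixOf]
  | cons x r =>
    simp [List.isPrefixOf]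
    exact eq_comm

theorem pvHead?_drop_lt {s : List Char} {c : Char} {n : Nat}
    (h : (s.drop n).head? = some c) : n < s.length := by
  by_contra hn
  rw [List.drop_eq_nil_iff.mpr (by omega)] at h
  simp at h

theorem pvGo_bounds (s : List Char) (c : Char) (j : Nat) :
    -1 ≤ PySem.Chars.rfind.go s [c] j ∧ PySem.Chars.rfind.go s [c] j < s.length := by
  induction j with
  | zero =>
    rw [pvGo_zero]
    split_ifs with h
    · have := pvHead?_drop_lt (n := 0) (by simpa using (pvPrefix_single c s).mp h)
      constructor <;> omega
    · constructor <;> omega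
  | succ j ih =>
    rw [pvGo_succ]
    split_ifs with h
    · have := pvHead?_drop_lt ((pvPrefix_single c _).mp h)
      constructor <;> omega
    · exact ih

theorem pvGo_not_mem {s : List Char} {c : Char} (h : c ∉ s) (j : Nat) :
    PySem.Chars.rfind.go s [c] j = -1 := by
  induction j with
  | zero =>
    rw [pvGo_zero, if_neg]
    intro hp
    have hh := (pvPrefix_single c s).mp hp
    exact h (by cases s <;> simp_all)
  | succ j ih =>
    rw [pvGo_succ, if_neg, ih]
    intro hp
    have hh := (pvPrefix_single c _).mp hp
    have hmem : c ∈ s.drop (j+1) := by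
      cases hdrop : s.drop (j+1) <;> simp_all
    exact h (List.mem_of_mem_drop hmem)

theorem pvRfind_not_mem {s : List Char} (h : '/' ∉ s) : PySem.Chars.rfind s ['/'] = -1 :=
  pvGo_not_mem h s.length

theorem pvGo_last (a b : List Char) (h : '/' ∉ b) (j : Nat) (hj : a.length ≤ j) :
    PySem.Chars.rfind.go (a ++ '/' :: b) ['/'] j = a.length := by
  induction j with
  | zero =>
    have ha : a = [] := by
      cases a with
      | nil => rfl
      | cons x r => simp at hj
    subst ha
    rw [pvGo_zero, if_pos (by simp [List.isPrefixOf])]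
    simp
  | succ j ih =>
    rcases Nat.eq_or_lt_of_le hj with heq | hlt
    · rw [pvGo_succ, if_pos]
      · omega
      · rw [(pvPrefix_single '/' _), List.head?_drop, ← heq, List.getElem?_append_right (by omega)]
        simp
    · rw [pvGo_succ, if_neg, ih (by omega)]
      rw [(pvPrefix_single '/' _), List.head?_drop, List.getElem?_append_right (by omega)]
      have hidx : j + 1 - a.length = (j - a.length) + 1 := by omega
      rw [hidx]
      simp only [List.getElem?_cons_succ]
      intro hc
      exact h (List.mem_of_getElem? hc)

theorem pvRfind_last (a b : List Char) (h : '/' ∉ b) :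
    PySem.Chars.rfind (a ++ '/' :: b) ['/'] = a.length := by
  unfold PySem.Chars.rfind
  exact pvGo_last a b h _ (by simp)

theorem pvSteps_bounds (k : Nat) (s : List Char) :
    -1 ≤ pvSteps k s ∧ pvSteps k s < s.length := by
  induction k with
  | zero => exact pvGo_bounds s '/' s.length
  | succ k ih =>
    have hstep : pvSteps (k+1) s = pvStep s (pvSteps k s) := rfl
    rw [hstep]
    unfold pvStep
    split_ifs with h
    · have hb := pvGo_bounds (s.take (pvSteps k s).toNat) '/' (s.take (pvSteps k s).toNat).length
      have hl : (s.take (pvSteps k s).toNat).length ≤ s.length := by simp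
      exact ⟨hb.1, lt_of_lt_of_le hb.2 (by exact_mod_cast hl)⟩
    · exact ih

theorem pvSteps_not_mem {s : List Char} (h : '/' ∉ s) (k : Nat) : pvSteps k s = -1 := by
  induction k with
  | zero => exact pvRfind_not_mem h
  | succ k ih =>
    have hstep : pvSteps (k+1) s = pvStep s (pvSteps k s) := rfl
    rw [hstep, ih]
    simp [pvStep]

theorem pvSteps_decomp (a b : List Char) (h : '/' ∉ b) (k : Nat) :
    pvSteps (k+1) (a ++ '/' :: b) = pvSteps k a := by
  induction k with
  | zero =>
    have hstep : pvSteps 1 (a ++ '/' :: b) = pvStep (a ++ '/' :: b) (pvSteps 0 (a ++ '/' :: b)) := rfl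
    rw [hstep]
    show pvStep _ (PySem.Chars.rfind (a ++ '/' :: b) ['/']) = PySem.Chars.rfind a ['/']
    rw [pvRfind_last a b h]
    unfold pvStep
    rw [if_pos (by positivity)]
    rw [Int.toNat_natCast, List.take_append_of_le_length (le_refl _), List.take_length]
  | succ k ih =>
    have hstep : pvSteps (k+2) (a ++ '/' :: b) = pvStep (a ++ '/' :: b) (pvSteps (k+1) (a ++ '/' :: b)) := rfl
    rw [hstep, ih]
    obtain ⟨h1, h2⟩ := pvSteps_bounds k a
    show pvStep _ _ = pvStep _ _
    unfold pvStep
    split_ifs with h0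
    · rw [List.take_append_of_le_length (by omega)]
    · rfl

theorem pvExists_last {c : Char} {s : List Char} (h : c ∈ s) :
    ∃ a b, s = a ++ c :: b ∧ c ∉ b := by
  induction s with
  | nil => simp at h
  | cons x r ih =>
    by_cases hr : c ∈ r
    · obtain ⟨a, b, hab, hb⟩ := ih hr
      exact ⟨x :: a, b, by rw [List.cons_append, hab], hb⟩
    · have hx : x = c := by
        rcases List.mem_cons.mp h with h' | h'
        · exact h'.symm
        · exact absurd h' hr
      exact ⟨[], r, by simp [hx], hr⟩

theorem pvSp_not_mem {s : List Char} (h : '/' ∉ s) : pvSp s = (s, []) := by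
  induction s with
  | nil => rfl
  | cons x r ih =>
    simp only [List.mem_cons, not_or] at h
    have hx : ¬ x = '/' := fun hh => h.1 hh.symm
    simp [pvSp, hx, ih h.2]

theorem pvSp_append (a b : List Char) (h : '/' ∉ b) :
    pvSp (a ++ '/' :: b) = ((pvSp a).1, (pvSp a).2 ++ [b]) := by
  induction a with
  | nil => simp [pvSp, pvSp_not_mem h]
  | cons x a' ih =>
    by_cases hx : x = '/'
    · subst hx; simp [pvSp, ih]
    · simp [pvSp, hx, ih]

theorem pvParts_append (a b : List Char) (h : '/' ∉ b) :
    pvParts (a ++ '/' :: b) = pvParts a ++ [b] := by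
  unfold pvParts
  rw [pvSp_append a b h]
  rfl

theorem pvSplitOn_go_eq (fuel : Nat) :
    ∀ (l cur : List Char) (acc : List (List Char)), l.length < fuel →
      PySem.Chars.splitOn.go ['/'] fuel l cur acc
        = acc.reverse ++ (cur.reverse ++ (pvSp l).1) :: (pvSp l).2 := by
  induction fuel with
  | zero => intro l cur acc h; omega
  | succ f ih =>
    intro l cur acc h
    cases l with
    | nil =>
      rw [show PySem.Chars.splitOn.go ['/'] (f+1) [] cur acc = (cur.reverse :: acc).reverse by
        simp [PySem.Chars.splitOn.go]]
      simp [pvSp]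
    | cons c rest =>
      rw [show PySem.Chars.splitOn.go ['/'] (f+1) (c :: rest) cur acc
          = (if ['/'].isPrefixOf (c :: rest) then
               PySem.Chars.splitOn.go ['/'] f (List.drop 1 (c :: rest)) [] (cur.reverse :: acc)
             else PySem.Chars.splitOn.go ['/'] f rest (c :: cur) acc) by
        simp [PySem.Chars.splitOn.go]]
      by_cases hc : c = '/'
      · rw [if_pos (by simp [List.isPrefixOf, hc])]
        simp only [List.drop_one, List.tail_cons]
        rw [ih rest [] _ (by simp at h; omega)]
        subst hc
        simp [pvSp]
      · rw [if_neg (by simp [List.isPrefixOf]; intro he; exact absurd he.symm hc)]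
        rw [ih rest (c :: cur) acc (by simp at h; omega)]
        simp [pvSp, hc]

theorem pvSplitOn_eq (s : List Char) : PySem.Chars.splitOn s ['/'] = pvParts s := by
  unfold PySem.Chars.splitOn
  rw [pvSplitOn_go_eq (s.length + 1) s [] [] (by omega)]
  simp [pvParts]

theorem pvJoin_append_singleton (sep b : List Char) (X : List (List Char)) (h : X ≠ []) :
    PySem.Chars.join sep (X ++ [b]) = PySem.Chars.join sep X ++ sep ++ b := by
  induction X with
  | nil => exact absurd rfl h
  | cons x X' ih =>
    cases X' with
    | nil => simp [PySem.Chars.join, List.intercalate]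
    | cons y X'' =>
      have hstep : ∀ (zs : List (List Char)),
          PySem.Chars.join sep (x :: y :: zs) = x ++ sep ++ PySem.Chars.join sep (y :: zs) := by
        intro zs
        simp [PySem.Chars.join, List.intercalate, List.flatten]
      rw [show (x :: y :: X'') ++ [b] = x :: y :: (X'' ++ [b]) by simp]
      rw [hstep, show (y :: (X'' ++ [b]) : List (List Char)) = (y :: X'') ++ [b] by simp]
      rw [ih (by simp), hstep]
      simp [List.append_assoc]

theorem pvCore : ∀ (k : Nat) (s : List Char),
    s.drop ((pvSteps k s + 1).toNat)
      = PySem.Chars.join ['/'] (List.drop ((pvParts s).length - (k+1)) (pvParts s)) := by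
  intro k
  induction k with
  | zero =>
    intro s
    by_cases hm : '/' ∈ s
    · obtain ⟨a, b, rfl, hb⟩ := pvExists_last hm
      have h0 : pvSteps 0 (a ++ '/' :: b) = a.length := pvRfind_last a b hb
      rw [h0, pvParts_append a b hb]
      have h1 : ((a.length : Int) + 1).toNat = a.length + 1 := by omega
      rw [h1]
      have h2 : (a ++ '/' :: b).drop (a.length + 1) = b := by
        rw [show a ++ '/' :: b = (a ++ ['/']) ++ b by simp]
        rw [show a.length + 1 = (a ++ ['/']).length by simp]
        exact List.drop_left
      rw [h2]
      have h3 : (pvParts a ++ [b]).length - 1 = (pvParts a).length := by simp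
      rw [h3, List.drop_left]
      simp [PySem.Chars.join, List.intercalate]
    · rw [pvSteps_not_mem hm 0]
      unfold pvParts
      rw [pvSp_not_mem hm]
      simp [PySem.Chars.join, List.intercalate]
  | succ k ih =>
    intro s
    by_cases hm : '/' ∈ s
    · obtain ⟨a, b, rfl, hb⟩ := pvExists_last hm
      rw [pvSteps_decomp a b hb, pvParts_append a b hb]
      obtain ⟨h1, h2⟩ := pvSteps_bounds k a
      have hm' : (pvSteps k a + 1).toNat ≤ a.length := by omega
      rw [List.drop_append_of_le_length hm', ih a]
      have hL1 : 1 ≤ (pvParts a).length := by unfold pvParts; simp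
      have h4 : (pvParts a ++ [b]).length - (k + 1 + 1) = (pvParts a).length - (k + 1) := by
        simp
      rw [h4, List.drop_append_of_le_length (by omega)]
      have hX : (pvParts a).drop ((pvParts a).length - (k+1)) ≠ [] := by
        intro hnil
        have := List.drop_eq_nil_iff.mp hnil
        omega
      rw [pvJoin_append_singleton ['/'] b _ hX]
      simp
    · rw [pvSteps_not_mem hm (k+1)]
      unfold pvParts
      rw [pvSp_not_mem hm]
      simp [PySem.Chars.join, List.intercalate]

theorem pvGuard_iff (s : String) :
    (PySem.Str.pyGet? s (-1) = some '/') ↔ PySem.Str.endswith s "/" = true := by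
  have hsl : ("/" : String).toList = ['/'] := by decide
  rw [show PySem.Str.endswith s "/" = PySem.Chars.endswith s.toList ['/'] by
      rw [PySem.Str.endswith_eq, hsl]]
  rw [PySem.Chars.endswith_iff]
  have hget : PySem.Str.pyGet? s (-1) = s.toList.getLast? := by
    simp [PySem.List.pyGet?_neg_one]
  rw [hget]
  constructor
  · intro h
    obtain ⟨ys, hys⟩ := List.getLast?_eq_some_iff.mp h
    exact ⟨ys, hys.symm⟩
  · rintro ⟨u, hu⟩
    rw [← hu]
    exact List.getLast?_eq_some_iff.mpr ⟨u, rfl⟩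

theorem pvStepA_eq (n2 : String) (idx : Int) :
    (if 0 ≤ idx then PySem.Str.rfind (PySem.Str.slice n2 none (some idx)) "/" else idx)
      = pvStep n2.toList idx := by
  have hsl : ("/" : String).toList = ['/'] := by decide
  unfold pvStep
  split_ifs with h
  · rw [PySem.Str.rfind_eq, hsl, PySem.Str.toList_slice]
    congr 1
    rw [PySem.Chars.slice_eq_listSlice]
    exact PySem.List.slice_to n2.toList h
  · rfl

/-- For any stripped string n2, A's tail (three rfind scans + suffix slice) equals
    B's tail (split on '/', keep the last three pieces, join). -/
theorem pvMain (n2 : String) :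
    PySem.Str.slice n2
        (some ((PySem.List.pyRange 0 2 1).foldl
          (fun idx _i => if 0 ≤ idx then PySem.Str.rfind (PySem.Str.slice n2 none (some idx)) "/" else idx)
          (PySem.Str.rfind n2 "/") + 1)) none
      = (match PySem.Str.split? n2 "/" with
         | some parts => PySem.Str.join "/" (PySem.List.slice parts (some (-3)) none)
         | none => "") := by
  have hsl : ("/" : String).toList = ['/'] := by decide
  set u := n2.toList with hu
  have hrange : PySem.List.pyRange 0 2 1 = [0, 1] := by decide
  have hfold :
      (PySem.List.pyRange 0 2 1).foldl
        (fun idx _i => if 0 ≤ idx then PySem.Str.rfind (PySem.Str.slice n2 none (some idx)) "/" else idx)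
        (PySem.Str.rfind n2 "/") = pvSteps 2 u := by
    rw [hrange]
    simp only [List.foldl_cons, List.foldl_nil]
    rw [pvStepA_eq, pvStepA_eq]
    rw [show PySem.Str.rfind n2 "/" = PySem.Chars.rfind u ['/'] by rw [PySem.Str.rfind_eq, hsl]]
    rfl
  rw [hfold]
  have hsplit : PySem.Str.split? n2 "/" ≠ none := by
    intro hnone
    have hb := PySem.Str.split?_map n2 "/"
    rw [hnone, hsl] at hb
    simp [PySem.Chars.split?] at hb
  cases hsp : PySem.Str.split? n2 "/" with
  | none => exact absurd hsp hsplit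
  | some parts =>
    have hbridge := PySem.Str.split?_map n2 "/"
    rw [hsp, hsl] at hbridge
    simp only [PySem.Chars.split?, List.isEmpty_cons, Option.map_some] at hbridge
    have hparts : parts.map String.toList = PySem.Chars.splitOn u ['/'] := by
      simpa using hbridge
    rw [← String.toList_inj]
    rw [PySem.Str.toList_slice, PySem.Str.toList_join, hsl]
    rw [PySem.Chars.slice_eq_listSlice]
    obtain ⟨hb1, _⟩ := pvSteps_bounds 2 u
    rw [PySem.List.slice_from u (by omega)]
    rw [PySem.List.slice_from_neg_ofNat parts 3 (by norm_num)]
    rw [List.map_drop, hparts, pvSplitOn_eq]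
    have hlen : parts.length = (pvParts u).length := by
      rw [← pvSplitOn_eq, ← hparts, List.length_map]
    rw [hlen]
    exact pvCore 2 u

-- ===== VERDICT (by name: the statement is the Claim_ definition above) =====
theorem remap_name_spec : Claim_equal_remap_name := by
  intro name _hdom _hpre
  unfold Spec_remap_name
  simp only [remap_name, remap_name_alt]
  have hguard : (if PySem.Str.pyGet? (PySem.Str.replace name "." "-") (-1) = some '/'
        then PySem.Str.slice (PySem.Str.replace name "." "-") none (some (-1))
        else PySem.Str.replace name "." "-")
      = (if PySem.Str.endswith (PySem.Str.replace name "." "-") "/"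
        then PySem.Str.slice (PySem.Str.replace name "." "-") none (some (-1))
        else PySem.Str.replace name "." "-") := by
    by_cases h : PySem.Str.pyGet? (PySem.Str.replace name "." "-") (-1) = some '/'
    · rw [if_pos h, if_pos ((pvGuard_iff _).mp h)]
    · rw [if_neg h, if_neg (fun hb => h ((pvGuard_iff _).mpr hb))]
  rw [hguard]
  exact pvMain _
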